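-- pv_equiv track=rewrite | github.com/JawadKotaichh/Codeforces | Divisions/Div2 975/A.py | maxPlusSize
-- ===== SOURCE A (Python) =====
-- def checkRedCases(indexOfMAx,n,maximum):
--     rightAvailableCases=indexOfMAx-1
--     leftAvailbleCases=n-2-indexOfMAx
--
--     if rightAvailableCases%2==0:
--         rightRedCases=rightAvailableCases//2
--     else:
--         rightRedCases=((rightAvailableCases-1)//2)+1
--
--     if leftAvailbleCases%2==0:
--         leftRedCases=leftAvailbleCases//2
--     else:
--         leftRedCases=((leftAvailbleCases-1)//2)+1
--     score=maximum+leftRedCases+rightRedCases+1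
--     return score
--
-- def maxPlusSize(n,L):
--     maximum=max(L)
--     indexOfMAx=L.index(maximum)
--     score=checkRedCases(indexOfMAx,n,maximum)
--
--     tempIndexOfMax=indexOfMAx
--
--     for i in range(indexOfMAx+1,n):
--         if L[i]==maximum:
--             if score<checkRedCases(i,n,maximum):
--                 score=checkRedCases(i,n,maximum)
--
--     return score
-- ===== SOURCE B (Python) =====
-- def maxPlusSize(n, L):
--     maximum = max(L)
--     half = (n - 1) // 2
--     if n % 2 == 0 or any(L[i] == maximum for i in range(0, n, 2)):
--         return maximum + 1 + half
--     return maximum + half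
-- ===== Notes on version B (the rewrite author's own statement) =====
-- stated objective: simpler
-- what changed: Replaces the scan over all positions of the maximum (with a ceil-by-parity score helper called per position) by a closed form: the answer is max(L) + (n-1)//2, plus 1 iff n is even or the maximum occurs at an even index below n.
-- intended difference: When n is odd and the first occurrence of the maximum sits at an even index not below n (so n does not describe the list: no maximum lies in the first n positions), A returns max(L)+(n-1)//2+1, awarding the parity bonus for an index outside the n-element window it scores, while B returns max(L)+(n-1)//2; B's value is the intended one since only positions below n can contribute. — e.g. on maxPlusSize(1, [0, 0, 1]): A returns 2, B returns 1
import Mathlib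
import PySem

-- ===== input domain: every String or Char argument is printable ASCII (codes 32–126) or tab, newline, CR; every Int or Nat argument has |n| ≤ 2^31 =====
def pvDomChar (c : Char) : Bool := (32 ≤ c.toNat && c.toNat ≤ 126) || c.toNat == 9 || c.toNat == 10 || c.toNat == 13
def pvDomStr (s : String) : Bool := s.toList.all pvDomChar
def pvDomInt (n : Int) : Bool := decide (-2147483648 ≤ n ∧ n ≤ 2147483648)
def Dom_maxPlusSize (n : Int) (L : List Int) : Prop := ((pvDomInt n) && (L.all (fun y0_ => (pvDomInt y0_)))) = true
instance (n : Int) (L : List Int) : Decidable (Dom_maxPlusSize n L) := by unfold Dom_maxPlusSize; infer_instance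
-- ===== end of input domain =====

-- B replaces A's scan over all positions of the maximum (ceil-by-parity helper per
-- position) by a closed form: max(L) + (n-1)//2, plus 1 iff n is even or the maximum
-- occurs at an even index below n.  Objective: simpler.

-- ===== PORT A =====
def checkRedCases (indexOfMax : Int) (n : Int) (maximum : Int) : Int :=
  let rightAvailableCases := indexOfMax - 1
  let leftAvailableCases := n - 2 - indexOfMax
  let rightRedCases :=
    if PySem.Int.mod rightAvailableCases 2 = 0 then
      PySem.Int.floordiv rightAvailableCases 2
    else
      PySem.Int.floordiv (rightAvailableCases - 1) 2 + 1
  let leftRedCases :=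
    if PySem.Int.mod leftAvailableCases 2 = 0 then
      PySem.Int.floordiv leftAvailableCases 2
    else
      PySem.Int.floordiv (leftAvailableCases - 1) 2 + 1
  maximum + leftRedCases + rightRedCases + 1

-- L[i] is ported as pyGetD with default 0; Pre_ keeps every loop index in range, so it
-- is exact there.
def maxPlusSize (n : Int) (L : List Int) : Int :=
  let maximum := (PySem.List.max? L (fun y => y)).getD 0
  let indexOfMax : Int := ((PySem.List.index? L maximum).getD 0 : Nat)
  let score := checkRedCases indexOfMax n maximum
  (PySem.List.pyRange (indexOfMax + 1) n 1).foldl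
    (fun score i =>
      if PySem.List.pyGetD L i 0 = maximum then
        if score < checkRedCases i n maximum then checkRedCases i n maximum else score
      else score)
    score

-- ===== PORT B =====
def maxPlusSize_alt (n : Int) (L : List Int) : Int :=
  let maximum := (PySem.List.max? L (fun y => y)).getD 0
  let half := PySem.Int.floordiv (n - 1) 2
  if PySem.Int.mod n 2 = 0
      ∨ (PySem.List.pyRange 0 n 2).any (fun i => PySem.List.pyGetD L i 0 == maximum) then
    maximum + 1 + half
  else
    maximum + half

-- ===== PRECONDITION & SPEC =====
-- Exactly where A returns: L nonempty (max([]) raises ValueError) and n ≤ len(L)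
-- (otherwise the loop evaluates L[i] for some i ≥ len(L) and raises IndexError).
def Pre_maxPlusSize (n : Int) (L : List Int) : Prop :=
  L ≠ [] ∧ n ≤ (L.length : Int)
instance (n : Int) (L : List Int) : Decidable (Pre_maxPlusSize n L) := by
  unfold Pre_maxPlusSize; infer_instance
def pvWitness_maxPlusSize : Int × List Int := (3, [1, 2, 1])

-- When n is odd and the first occurrence of the maximum sits at an even index not below
-- n (so no maximum lies in the first n positions), A returns max(L)+(n-1)//2+1,
-- awarding the parity bonus for an index outside the n-element window it scores, while
-- B returns max(L)+(n-1)//2; B's value is the intended one since only positions below n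
-- can contribute.
def D_maxPlusSize (n : Int) (L : List Int) : Prop :=
  n % 2 = 1 ∧
  ∃ i : Fin L.length, i.val % 2 = 0 ∧ n ≤ (i.val : Int) ∧
    (∀ y ∈ L, y ≤ L[i]) ∧ (∀ j : Fin L.length, j < i → L[j] < L[i])
instance (n : Int) (L : List Int) : Decidable (D_maxPlusSize n L) := by
  unfold D_maxPlusSize; infer_instance

def Spec_maxPlusSize (n : Int) (L : List Int) (out : Int) : Prop :=
  ¬ D_maxPlusSize n L → out = maxPlusSize_alt n L
instance (n : Int) (L : List Int) (out : Int) : Decidable (Spec_maxPlusSize n L out) := by unfold Spec_maxPlusSize; infer_instance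

def pvDiffWitness_maxPlusSize : Int × List Int := (1, [0, 0, 1])
def pvDiffWitnessOut_maxPlusSize : Int × Int := (2, 1)

-- ===== CLAIM (what is proved, stated in full; the proofs are below) =====
def Claim_unchanged_maxPlusSize : Prop := ∀ (n : Int) (L : List Int), Dom_maxPlusSize n L → Pre_maxPlusSize n L → Spec_maxPlusSize n L (maxPlusSize n L)
def Claim_changed_maxPlusSize : Prop := Dom_maxPlusSize (pvDiffWitness_maxPlusSize.1) (pvDiffWitness_maxPlusSize.2) ∧ Pre_maxPlusSize (pvDiffWitness_maxPlusSize.1) (pvDiffWitness_maxPlusSize.2) ∧ D_maxPlusSize (pvDiffWitness_maxPlusSize.1) (pvDiffWitness_maxPlusSize.2) ∧ maxPlusSize (pvDiffWitness_maxPlusSize.1) (pvDiffWitness_maxPlusSize.2) = pvDiffWitnessOut_maxPlusSize.1 ∧ maxPlusSize_alt (pvDiffWitness_maxPlusSize.1) (pvDiffWitness_maxPlusSize.2) = pvDiffWitnessOut_maxPlusSize.2 ∧ pvDiffWitnessOut_maxPlusSize.1 ≠ pvDiffWitnessOut_maxPlusSize.2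
def Claim_exact_maxPlusSize : Prop := ∀ (n : Int) (L : List Int), Dom_maxPlusSize n L → Pre_maxPlusSize n L → D_maxPlusSize n L → maxPlusSize n L ≠ maxPlusSize_alt n L

-- ===== LEMMAS AND PROOFS =====

-- closed form for A's per-position score helper (Int ediv/emod, divisor 2 > 0)
lemma checkRedCases_closed (i n m : Int) :
    checkRedCases i n m = m + (n - 1) / 2 + (if n % 2 = 0 ∨ i % 2 = 0 then 1 else 0) := by
  simp only [checkRedCases, PySem.Int.mod_eq_emod_of_pos (by omega : (0:Int) < 2),
    PySem.Int.floordiv_eq_ediv_of_pos (by omega : (0:Int) < 2)]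
  split_ifs <;> omega

lemma checkRedCases_le (i n m : Int) : checkRedCases i n m ≤ m + (n - 1) / 2 + 1 := by
  rw [checkRedCases_closed]; split_ifs <;> omega

lemma checkRedCases_ge (i n m : Int) : m + (n - 1) / 2 ≤ checkRedCases i n m := by
  rw [checkRedCases_closed]; split_ifs <;> omega

-- A's loop computes: m+H+1 if some scanned index beats the accumulator, else the accumulator
lemma foldA (L : List Int) (n m : Int) (r : List Int) (acc : Int)
    (hacc : m + (n - 1) / 2 ≤ acc) :
    r.foldl
      (fun score i =>
        if PySem.List.pyGetD L i 0 = m then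
          if score < checkRedCases i n m then checkRedCases i n m else score
        else score) acc
    = if ∃ i ∈ r, PySem.List.pyGetD L i 0 = m ∧ acc < checkRedCases i n m then
        m + (n - 1) / 2 + 1
      else acc := by
  induction r generalizing acc with
  | nil => simp
  | cons i r ih =>
    simp only [List.foldl_cons]
    by_cases hm : PySem.List.pyGetD L i 0 = m
    · by_cases hlt : acc < checkRedCases i n m
      · have hc : checkRedCases i n m = m + (n - 1) / 2 + 1 := by
          have := checkRedCases_le i n m
          have := checkRedCases_ge i n m
          omega
        rw [if_pos hm, if_pos hlt, hc, ih _ (by omega)]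
        have hnone : ¬ ∃ j ∈ r, PySem.List.pyGetD L j 0 = m ∧
            m + (n - 1) / 2 + 1 < checkRedCases j n m := by
          rintro ⟨j, _, _, hj⟩
          have := checkRedCases_le j n m
          omega
        rw [if_neg hnone, if_pos ⟨i, List.mem_cons_self, hm, hlt⟩]
      · rw [if_pos hm, if_neg hlt, ih _ hacc]
        congr 1
        simp only [List.mem_cons, eq_iff_iff]
        constructor
        · rintro ⟨j, hj, h1, h2⟩; exact ⟨j, .inr hj, h1, h2⟩
        · rintro ⟨j, hj, h1, h2⟩
          rcases hj with rfl | hj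
          · exact absurd h2 hlt
          · exact ⟨j, hj, h1, h2⟩
    · rw [if_neg hm, ih _ hacc]
      congr 1
      simp only [List.mem_cons, eq_iff_iff]
      constructor
      · rintro ⟨j, hj, h1, h2⟩; exact ⟨j, .inr hj, h1, h2⟩
      · rintro ⟨j, hj, h1, h2⟩
        rcases hj with rfl | hj
        · exact absurd h1 hm
        · exact ⟨j, hj, h1, h2⟩

-- ===== VERDICT (by name: the statement is the Claim_ definition above) =====
theorem maxPlusSize_spec : Claim_unchanged_maxPlusSize := by
  intro n L _ hpre hnD
  obtain ⟨hne, hn⟩ := hpre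
  obtain ⟨x, t, rfl⟩ := List.exists_cons_of_ne_nil hne
  have hmax := PySem.List.max?_id_cons x t
  set m := List.foldl max x t with hm_def
  have hmem : m ∈ x :: t := by
    rcases PySem.List.foldl_max_mem t x with h | h
    · rw [hm_def, h]; exact List.mem_cons_self
    · exact List.mem_cons_of_mem _ h
  have hub : ∀ y ∈ x :: t, y ≤ m := by
    intro y hy
    rcases List.mem_cons.mp hy with rfl | hy
    · exact (PySem.List.le_foldl_max t y).1
    · exact (PySem.List.le_foldl_max t x).2 y hy
  obtain ⟨k, hk⟩ := Option.isSome_iff_exists.mp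
    ((PySem.List.index?_isSome_iff (x :: t) m).mpr hmem)
  obtain ⟨hklen, hLk, hkmin⟩ := PySem.List.getElem_of_index?_eq_some hk
  show maxPlusSize n (x :: t) = maxPlusSize_alt n (x :: t)
  unfold maxPlusSize maxPlusSize_alt
  simp only [hmax, hk, Option.getD_some]
  rw [foldA (x :: t) n m _ _ (checkRedCases_ge _ n m)]
  simp only [PySem.Int.mod_eq_emod_of_pos (by omega : (0:Int) < 2),
    PySem.Int.floordiv_eq_ediv_of_pos (by omega : (0:Int) < 2)]
  have hgetk : PySem.List.pyGetD (x :: t) (k : Int) 0 = m := by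
    rw [PySem.List.pyGetD_eq_getElem _ _ (by omega) (by exact_mod_cast hklen)]
    simpa using hLk
  by_cases hE : n % 2 = 0
  · -- n even: every position scores m+H+1
    have hcK : checkRedCases (k : Int) n m = m + (n - 1) / 2 + 1 := by
      rw [checkRedCases_closed, if_pos (Or.inl hE)]
    rw [if_neg, if_pos (Or.inl hE)]
    · rw [hcK]; ring
    · rintro ⟨i, _, _, hlt⟩
      have := checkRedCases_le i n m
      omega
  · have hn2 : n % 2 = 1 := by omega
    by_cases hkpar : ((k : Nat) : Int) % 2 = 0
    · -- n odd, first max position even: it must lie below n (else D_ would hold)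
      have hkn : ((k : Nat) : Int) < n := by
        by_contra hnk
        refine hnD ⟨hn2, ⟨k, hklen⟩, ?_, ?_, ?_, ?_⟩
        · show k % 2 = 0; omega
        · show n ≤ ((k : Nat) : Int); omega
        · intro y hy
          simp only [Fin.getElem_fin]
          rw [hLk]; exact hub y hy
        · intro j hj
          have hjne := hkmin j.val hj
          have hjle := hub ((x :: t)[j.val]) (List.getElem_mem j.isLt)
          simp only [Fin.getElem_fin]
          rw [hLk]
          omega
      have hcK : checkRedCases (k : Int) n m = m + (n - 1) / 2 + 1 := by
        rw [checkRedCases_closed, if_pos (Or.inr hkpar)]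
      rw [if_neg, if_pos]
      · rw [hcK]; ring
      · refine Or.inr (List.any_eq_true.mpr ⟨(k : Int), ?_, by simp [hgetk]⟩)
        rw [PySem.List.mem_pyRange_iff_of_pos (by omega : (0:Int) < 2)]
        exact ⟨by omega, by omega, by omega⟩
      · rintro ⟨i, _, _, hlt⟩
        have := checkRedCases_le i n m
        omega
    · -- n odd, first max position odd
      have hcK : checkRedCases (k : Int) n m = m + (n - 1) / 2 := by
        rw [checkRedCases_closed,
          if_neg (by tauto : ¬ (n % 2 = 0 ∨ ((k : Nat) : Int) % 2 = 0))]
        ring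
      have hiff : (∃ i ∈ PySem.List.pyRange ((k : Int) + 1) n 1,
            PySem.List.pyGetD (x :: t) i 0 = m ∧
              checkRedCases (k : Int) n m < checkRedCases i n m)
          ↔ ((PySem.List.pyRange 0 n 2).any
              (fun i => PySem.List.pyGetD (x :: t) i 0 == m)) = true := by
        rw [List.any_eq_true]
        constructor
        · rintro ⟨i, hir, hig, hlt⟩
          rw [PySem.List.mem_pyRange_one] at hir
          have hie : i % 2 = 0 := by
            by_contra hio
            have : checkRedCases i n m = m + (n - 1) / 2 := by
              rw [checkRedCases_closed,
                if_neg (by tauto : ¬ (n % 2 = 0 ∨ i % 2 = 0))]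
              ring
            omega
          refine ⟨i, ?_, by simp [hig]⟩
          rw [PySem.List.mem_pyRange_iff_of_pos (by omega : (0:Int) < 2)]
          exact ⟨by omega, by omega, by omega⟩
        · rintro ⟨j, hjr, hjg⟩
          rw [PySem.List.mem_pyRange_iff_of_pos (by omega : (0:Int) < 2)] at hjr
          obtain ⟨hj0, hjn, hjd⟩ := hjr
          have hje : j % 2 = 0 := by omega
          have hjg' : PySem.List.pyGetD (x :: t) j 0 = m := by simpa using hjg
          have hjnat : ((x :: t) : List Int)[j.toNat]'(by omega) = m := by
            rw [← PySem.List.pyGetD_eq_getElem (x :: t) 0 hj0 (by omega)]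
            exact hjg'
          have hjk : (k : Int) < j := by
            rcases lt_trichotomy j (k : Int) with h | h | h
            · exact absurd hjnat (hkmin j.toNat (by omega))
            · omega
            · exact h
          refine ⟨j, ?_, hjg', ?_⟩
          · rw [PySem.List.mem_pyRange_one]; exact ⟨by omega, by omega⟩
          · rw [hcK, checkRedCases_closed, if_pos (Or.inr hje)]
            omega
      by_cases hB : ((PySem.List.pyRange 0 n 2).any
          (fun i => PySem.List.pyGetD (x :: t) i 0 == m)) = true
      · rw [if_pos (hiff.mpr hB), if_pos (Or.inr hB)]; ring
      · rw [if_neg, if_neg, hcK]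
        · rintro (h | h)
          · exact hE h
          · exact hB h
        · exact fun h => hB (hiff.mp h)

theorem maxPlusSize_changed : Claim_changed_maxPlusSize := by
  unfold Claim_changed_maxPlusSize; decide

theorem maxPlusSize_tight : Claim_exact_maxPlusSize := by
  intro n L _ hpre hD
  obtain ⟨hne, hn⟩ := hpre
  obtain ⟨hn2, i, hipar, hni, hiub, hifirst⟩ := hD
  obtain ⟨x, t, rfl⟩ := List.exists_cons_of_ne_nil hne
  have hmax := PySem.List.max?_id_cons x t
  set m := List.foldl max x t with hm_def
  have hmem : m ∈ x :: t := by
    rcases PySem.List.foldl_max_mem t x with h | h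
    · rw [hm_def, h]; exact List.mem_cons_self
    · exact List.mem_cons_of_mem _ h
  have hub : ∀ y ∈ x :: t, y ≤ m := by
    intro y hy
    rcases List.mem_cons.mp hy with rfl | hy
    · exact (PySem.List.le_foldl_max t y).1
    · exact (PySem.List.le_foldl_max t x).2 y hy
  obtain ⟨k, hk⟩ := Option.isSome_iff_exists.mp
    ((PySem.List.index?_isSome_iff (x :: t) m).mpr hmem)
  obtain ⟨hklen, hLk, hkmin⟩ := PySem.List.getElem_of_index?_eq_some hk
  have him : (x :: t)[i.val] = m :=
    le_antisymm (hub _ (List.getElem_mem i.isLt)) (hiub m hmem)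
  have hik : i.val = k := by
    rcases lt_trichotomy i.val k with h | h | h
    · exact absurd him (hkmin i.val h)
    · exact h
    · have := hifirst ⟨k, hklen⟩ h
      simp only [Fin.getElem_fin] at this
      rw [hLk, him] at this
      omega
  have hkpar : ((k : Nat) : Int) % 2 = 0 := by omega
  have hkn : n ≤ ((k : Nat) : Int) := by omega
  unfold maxPlusSize maxPlusSize_alt
  simp only [hmax, hk, Option.getD_some]
  rw [foldA (x :: t) n m _ _ (checkRedCases_ge _ n m)]
  simp only [PySem.Int.mod_eq_emod_of_pos (by omega : (0:Int) < 2),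
    PySem.Int.floordiv_eq_ediv_of_pos (by omega : (0:Int) < 2)]
  have hcK : checkRedCases (k : Int) n m = m + (n - 1) / 2 + 1 := by
    rw [checkRedCases_closed, if_pos (Or.inr hkpar)]
  rw [if_neg, if_neg]
  · rw [hcK]; omega
  · rintro (h | h)
    · omega
    · rcases List.any_eq_true.mp h with ⟨j, hjr, hjg⟩
      rw [PySem.List.mem_pyRange_iff_of_pos (by omega : (0:Int) < 2)] at hjr
      obtain ⟨hj0, hjn, hjd⟩ := hjr
      have hjg' : PySem.List.pyGetD (x :: t) j 0 = m := by simpa using hjg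
      have hjnat : ((x :: t) : List Int)[j.toNat]'(by omega) = m := by
        rw [← PySem.List.pyGetD_eq_getElem (x :: t) 0 hj0 (by omega)]
        exact hjg'
      exact absurd hjnat (hkmin j.toNat (by omega))
  · rintro ⟨j, hjr, _, hlt⟩
    have := checkRedCases_le j n m
    omega
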